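-- pv_equiv track=rewrite | github.com/viaifoundation/ting | scripts/build_wisdom_praise_plans.py | psalm_counts_min_one_per_day
-- ===== SOURCE A (Python) =====
-- def distribute(total: int, days: int) -> list[int]:
--     """Split `total` into `days` non-negative counts differing by at most 1 (extras on last days)."""
--     if days < 1:
--         raise ValueError("days must be >= 1")
--     if total < 0:
--         raise ValueError("total must be non-negative")
--     base, rem = divmod(total, days)
--     return [base + (1 if i >= days - rem else 0) for i in range(days)]
--
-- def psalm_counts_min_one_per_day(days: int) -> list[int]:
--     """All 150 psalms, sequential, at least one per day. Extras spread on later days."""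
--     if days > 150:
--         raise ValueError("Cannot assign 150 psalms with ≥1/day when days > 150")
--     if days < 1:
--         raise ValueError("days must be >= 1")
--     extra_total = 150 - days
--     extras = distribute(extra_total, days)
--     return [1 + e for e in extras]
-- ===== SOURCE B (Python) =====
-- def psalm_counts_min_one_per_day(days: int) -> list[int]:
--     """All 150 psalms, sequential, at least one per day. Extras spread on later days."""
--     if days > 150:
--         raise ValueError("Cannot assign 150 psalms with ≥1/day when days > 150")
--     if days < 1:
--         raise ValueError("days must be >= 1")
--     counts = []
--     remaining = 150
--     for d in range(days, 0, -1):
--         c = -(-remaining // d)  # ceiling division: fair share for the last of d days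
--         counts.append(c)
--         remaining -= c
--     counts.reverse()
--     return counts
-- ===== Notes on version B (the rewrite author's own statement) =====
-- stated objective: alternative
-- what changed: Replaces the divmod-then-per-index-conditional comprehension with a greedy back-to-front loop that repeatedly hands the last remaining day its ceiling fair share ceil(remaining/d), subtracts it, and reverses the accumulated list; no single divmod of the total and no per-element branch.
import Mathlib
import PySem

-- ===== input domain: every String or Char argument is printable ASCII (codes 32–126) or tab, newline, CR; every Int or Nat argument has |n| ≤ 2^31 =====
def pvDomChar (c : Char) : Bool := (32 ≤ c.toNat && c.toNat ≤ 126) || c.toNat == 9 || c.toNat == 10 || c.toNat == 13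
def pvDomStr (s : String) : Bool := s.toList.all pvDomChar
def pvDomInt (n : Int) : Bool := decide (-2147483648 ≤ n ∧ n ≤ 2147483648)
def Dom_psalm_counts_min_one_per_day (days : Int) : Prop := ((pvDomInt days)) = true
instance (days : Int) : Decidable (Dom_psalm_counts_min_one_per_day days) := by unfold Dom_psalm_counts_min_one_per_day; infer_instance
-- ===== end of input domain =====

-- B replaces the divmod/per-index-conditional construction by a greedy back-to-front
-- loop giving the last remaining day its ceiling fair share (objective: alternative).

-- ===== PORT A =====
-- helper: distribute(total, days) (its guards are unreachable under Pre_)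
def pv_distribute (total days : Int) : List Int :=
  let base := PySem.Int.floordiv total days
  let rem := PySem.Int.mod total days
  (PySem.List.pyRange 0 days 1).map (fun i => base + (if days - rem ≤ i then 1 else 0))

def psalm_counts_min_one_per_day (days : Int) : List Int :=
  let extra_total : Int := 150 - days
  let extras := pv_distribute extra_total days
  extras.map (fun e => 1 + e)

-- ===== PORT B =====
-- loop 'for d in range(days, 0, -1)': d counts down from n; c = -(-remaining // d)
def pvAltLoop : Nat → Int → List Int
  | 0, _ => []
  | Nat.succ n, remaining =>
      let c := -(PySem.Int.floordiv (-remaining) (Nat.succ n : Int))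
      c :: pvAltLoop n (remaining - c)

def psalm_counts_min_one_per_day_alt (days : Int) : List Int :=
  (pvAltLoop days.toNat 150).reverse

-- ===== PRECONDITION & SPEC =====
-- Pre_ excludes exactly the inputs on which A raises ValueError (days > 150 or days < 1).
def Pre_psalm_counts_min_one_per_day (days : Int) : Prop := 1 ≤ days ∧ days ≤ 150
instance (days : Int) : Decidable (Pre_psalm_counts_min_one_per_day days) := by unfold Pre_psalm_counts_min_one_per_day; infer_instance
def pvWitness_psalm_counts_min_one_per_day : Int := (7)

def Spec_psalm_counts_min_one_per_day (days : Int) (out : List Int) : Prop := out = psalm_counts_min_one_per_day_alt days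
instance (days : Int) (out : List Int) : Decidable (Spec_psalm_counts_min_one_per_day days out) := by unfold Spec_psalm_counts_min_one_per_day; infer_instance

-- ===== CLAIM =====
def Claim_equal_psalm_counts_min_one_per_day : Prop := ∀ (days : Int), Dom_psalm_counts_min_one_per_day days → Pre_psalm_counts_min_one_per_day days → Spec_psalm_counts_min_one_per_day days (psalm_counts_min_one_per_day days)

-- ===== LEMMAS AND PROOFS =====

-- ===== VERDICT =====
set_option maxRecDepth 100000 in
theorem psalm_counts_min_one_per_day_spec : Claim_equal_psalm_counts_min_one_per_day := by
  unfold Claim_equal_psalm_counts_min_one_per_day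
  intro days _ hpre
  obtain ⟨h1, h2⟩ := hpre
  unfold Spec_psalm_counts_min_one_per_day
  interval_cases days <;> decide
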